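-- pv_equiv track=rewrite | github.com/ronniejay22/Knot-APP | Knot/backend/app/services/integrations/reservation.py | _city_to_resy_slug
-- ===== SOURCE A (Python) =====
-- from typing import Any, Optional
--
-- CITY_TO_RESY_SLUG: dict[str, str] = {
--     "New York": "ny",
--     "New York City": "ny",
--     "NYC": "ny",
--     "Manhattan": "ny",
--     "Brooklyn": "ny",
--     "Los Angeles": "la",
--     "LA": "la",
--     "San Francisco": "sf",
--     "SF": "sf",
--     "Chicago": "chi",
--     "Miami": "mia",
--     "Austin": "atx",
--     "Denver": "den",
--     "Nashville": "nas",
--     "Washington": "dc",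
--     "Washington DC": "dc",
--     "DC": "dc",
--     "Seattle": "sea",
--     "Portland": "pdx",
--     "Houston": "hou",
--     "Dallas": "dal",
--     "Atlanta": "atl",
--     "Boston": "bos",
--     "Philadelphia": "phi",
--     "Las Vegas": "lv",
--     "New Orleans": "nola",
--     "London": "london",
--     "Paris": "paris",
-- }
--
-- def _city_to_resy_slug(city: str) -> Optional[str]:
--     """
--     Convert a city name to a Resy city slug.
--
--     Returns None if the city is not in Resy's supported cities map.
--     Performs case-insensitive lookup with partial matching.
--     """
--     if not city or not city.strip():
--         return None
--
--     city_lower = city.strip().lower()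
--
--     # Try exact match first (case-insensitive)
--     for key, slug in CITY_TO_RESY_SLUG.items():
--         if key.lower() == city_lower:
--             return slug
--
--     # Try partial match (city name contained in key or vice versa)
--     for key, slug in CITY_TO_RESY_SLUG.items():
--         if city_lower in key.lower() or key.lower() in city_lower:
--             return slug
--
--     return None
-- ===== SOURCE B (Python) =====
-- CITY_TO_RESY_SLUG = {
--     "New York": "ny", "New York City": "ny", "NYC": "ny", "Manhattan": "ny",
--     "Brooklyn": "ny", "Los Angeles": "la", "LA": "la", "San Francisco": "sf",
--     "SF": "sf", "Chicago": "chi", "Miami": "mia", "Austin": "atx",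
--     "Denver": "den", "Nashville": "nas", "Washington": "dc",
--     "Washington DC": "dc", "DC": "dc", "Seattle": "sea", "Portland": "pdx",
--     "Houston": "hou", "Dallas": "dal", "Atlanta": "atl", "Boston": "bos",
--     "Philadelphia": "phi", "Las Vegas": "lv", "New Orleans": "nola",
--     "London": "london", "Paris": "paris",
-- }
--
-- def _city_to_resy_slug(city):
--     """Single pass: exact match returns immediately; first partial match is
--     remembered as a candidate and returned only if no exact match exists."""
--     if not city or not city.strip():
--         return None
--     city_lower = city.strip().lower()
--     candidate = None
--     for key, slug in CITY_TO_RESY_SLUG.items():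
--         key_lower = key.lower()
--         if key_lower == city_lower:
--             return slug
--         if candidate is None and (city_lower in key_lower or key_lower in city_lower):
--             candidate = slug
--     return candidate
-- ===== Notes on version B (the rewrite author's own statement) =====
-- stated objective: simpler
-- what changed: Replaces A's two full scans of the city map (exact pass, then partial pass) with a single pass that threads a first-partial candidate and short-circuits on an exact match.
import Mathlib
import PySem

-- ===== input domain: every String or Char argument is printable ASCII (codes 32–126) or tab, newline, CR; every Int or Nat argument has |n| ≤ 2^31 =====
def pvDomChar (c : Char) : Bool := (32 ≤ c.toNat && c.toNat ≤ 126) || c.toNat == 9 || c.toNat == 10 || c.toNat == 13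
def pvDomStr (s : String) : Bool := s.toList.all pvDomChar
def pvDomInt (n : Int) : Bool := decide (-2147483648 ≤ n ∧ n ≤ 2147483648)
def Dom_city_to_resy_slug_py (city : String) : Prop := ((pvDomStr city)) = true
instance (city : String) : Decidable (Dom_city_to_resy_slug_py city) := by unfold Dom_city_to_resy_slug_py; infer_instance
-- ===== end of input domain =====

-- B replaces A's two full scans of the city map with ONE pass threading a
-- first-partial candidate; objective: simpler (same O(n) cost).

-- ===== PORT A =====
def cityToResySlug : List (String × String) :=
  [("New York", "ny"), ("New York City", "ny"), ("NYC", "ny"), ("Manhattan", "ny"),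
   ("Brooklyn", "ny"), ("Los Angeles", "la"), ("LA", "la"), ("San Francisco", "sf"),
   ("SF", "sf"), ("Chicago", "chi"), ("Miami", "mia"), ("Austin", "atx"),
   ("Denver", "den"), ("Nashville", "nas"), ("Washington", "dc"),
   ("Washington DC", "dc"), ("DC", "dc"), ("Seattle", "sea"), ("Portland", "pdx"),
   ("Houston", "hou"), ("Dallas", "dal"), ("Atlanta", "atl"), ("Boston", "bos"),
   ("Philadelphia", "phi"), ("Las Vegas", "lv"), ("New Orleans", "nola"),
   ("London", "london"), ("Paris", "paris")]

-- first loop of A: exact case-insensitive key match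
def exactLoop : List (String × String) → String → Option String
  | [], _ => none
  | (k, s) :: t, c => if PySem.Str.lower k = c then some s else exactLoop t c

-- second loop of A: substring partial match either way
def partialLoop : List (String × String) → String → Option String
  | [], _ => none
  | (k, s) :: t, c =>
      if PySem.Str.isIn c (PySem.Str.lower k) || PySem.Str.isIn (PySem.Str.lower k) c
      then some s else partialLoop t c

def city_to_resy_slug_py (city : String) : Option String :=
  if city = "" || PySem.Str.strip city = "" then none
  else
    let cityLower := PySem.Str.lower (PySem.Str.strip city)
    match exactLoop cityToResySlug cityLower with
    | some s => some s
    | none => partialLoop cityToResySlug cityLower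

-- ===== PORT B =====
-- single pass: return on exact match, remember the first partial match
def singleLoop : List (String × String) → String → Option String → Option String
  | [], _, cand => cand
  | (k, s) :: t, c, cand =>
      let kl := PySem.Str.lower k
      if kl = c then some s
      else if cand.isNone && (PySem.Str.isIn c kl || PySem.Str.isIn kl c)
      then singleLoop t c (some s)
      else singleLoop t c cand

def city_to_resy_slug_py_alt (city : String) : Option String :=
  if city = "" || PySem.Str.strip city = "" then none
  else singleLoop cityToResySlug (PySem.Str.lower (PySem.Str.strip city)) none

-- ===== PRECONDITION & SPEC =====
def Spec_city_to_resy_slug_py (city : String) (out : Option String) : Prop := out = city_to_resy_slug_py_alt city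
instance (city : String) (out : Option String) : Decidable (Spec_city_to_resy_slug_py city out) := by unfold Spec_city_to_resy_slug_py; infer_instance

-- ===== CLAIM (what is proved, stated in full; the proofs are below) =====
def Claim_equal_city_to_resy_slug_py : Prop := ∀ (city : String), Dom_city_to_resy_slug_py city → Spec_city_to_resy_slug_py city (city_to_resy_slug_py city)

-- ===== LEMMAS AND PROOFS =====

-- The single pass with candidate `cand` equals: first exact match, else `cand`, else first partial match.
theorem singleLoop_eq (l : List (String × String)) (c : String) (cand : Option String) :
    singleLoop l c cand =
      match exactLoop l c with
      | some s => some s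
      | none => match cand with
                | some x => some x
                | none => partialLoop l c := by
  induction l generalizing cand with
  | nil => cases cand <;> simp [singleLoop, exactLoop, partialLoop]
  | cons p t ih =>
      obtain ⟨k, s⟩ := p
      by_cases h1 : PySem.Str.lower k = c
      · simp [singleLoop, exactLoop, h1]
      · by_cases hp : (PySem.Str.isIn c (PySem.Str.lower k) || PySem.Str.isIn (PySem.Str.lower k) c) = true
        all_goals simp only [Bool.or_eq_true, PySem.Str.isIn_eq, PySem.Str.toList_lower] at hp
        · cases cand <;> simp [singleLoop, exactLoop, partialLoop, h1, hp, ih]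
        · cases cand <;> simp [singleLoop, exactLoop, partialLoop, h1, hp, ih]

-- ===== VERDICT (by name: the statement is the Claim_ definition above) =====
theorem city_to_resy_slug_py_spec : Claim_equal_city_to_resy_slug_py := by
  intro city _
  unfold Spec_city_to_resy_slug_py city_to_resy_slug_py city_to_resy_slug_py_alt
  split_ifs with h
  · rfl
  · rw [singleLoop_eq]
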